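-- pv_equiv track=rewrite | github.com/reeze1829/study | A-EYE Parking/main 1/guide_matching logic(2).py | get_parking_guide
-- ===== SOURCE A (Python) =====
-- def get_parking_guide(user, seat_status):
--     if user is None:
--         return "외부 차량입니다. 경비실로 문의해 주세요."
--
--     name, dong, my_area = user['name'], user['dong'], user['my_area']
--
--     # 전체 빈자리 리스트 [주차 칸 딕셔너리를 거리순으로 정렬해야만 함]
--     all_empty = [s for s, status in seat_status.items() if status == "Empty"]
--
--     # 단지에 빈자리가 하나도 없을 때
--     if not all_empty:
--         return f"{name}님, 현재 전 구역 만차입니다. 우선 입차 후 통로에서 서행하며 빈자리를 기다려 주세요."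
--
--     # 우리 동(my_area) 키워드가 포함된 빈자리부터 찾기
--     my_home_empty = [s for s in all_empty if str(my_area) in s]
--
--     if my_home_empty:
--         best_seat = my_home_empty[0]
--         return f"{name}님 환영합니다! 거주하시는 {dong} 근처 [{best_seat}]에 주차하세요."
--
--     # 우리 동네 자리는 없지만 다른 곳(다른 동)에 빈자리가 있을 때
--     # all_empty[0]은 전체 중 가장 가까운 순서
--     alt_seat = all_empty[0]
--     return f"{name}님, {dong} 근처가 만차입니다. 다른 구역 중 가장 가까운 [{alt_seat}]로 안내할게요."
-- ===== SOURCE B (Python) =====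
-- def get_parking_guide(user, seat_status):
--     if user is None:
--         return "외부 차량입니다. 경비실로 문의해 주세요."
--
--     name, dong, my_area = user['name'], user['dong'], user['my_area']
--     area = str(my_area)
--
--     # Priority selection: rank every empty seat by (not-in-my-area, distance index)
--     # and pick the minimum; the rank's first component tells which message to use.
--     ranked = [((0 if area in seat else 1), i)
--               for i, (seat, status) in enumerate(seat_status.items())
--               if status == "Empty"]
--     if not ranked:
--         return f"{name}님, 현재 전 구역 만차입니다. 우선 입차 후 통로에서 서행하며 빈자리를 기다려 주세요."
--
--     pr, idx = min(ranked)
--     best = list(seat_status)[idx]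
--     if pr == 0:
--         return f"{name}님 환영합니다! 거주하시는 {dong} 근처 [{best}]에 주차하세요."
--     return f"{name}님, {dong} 근처가 만차입니다. 다른 구역 중 가장 가까운 [{best}]로 안내할게요."
-- ===== Notes on version B (the rewrite author's own statement) =====
-- stated objective: alternative
-- what changed: Replaced A's staged first-match filters (all empty seats, then those containing my_area) by priority selection: rank every empty seat with the key (area-not-in-seat, distance index) and take the minimum; the winner's rank decides which message is used.
import Mathlib
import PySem

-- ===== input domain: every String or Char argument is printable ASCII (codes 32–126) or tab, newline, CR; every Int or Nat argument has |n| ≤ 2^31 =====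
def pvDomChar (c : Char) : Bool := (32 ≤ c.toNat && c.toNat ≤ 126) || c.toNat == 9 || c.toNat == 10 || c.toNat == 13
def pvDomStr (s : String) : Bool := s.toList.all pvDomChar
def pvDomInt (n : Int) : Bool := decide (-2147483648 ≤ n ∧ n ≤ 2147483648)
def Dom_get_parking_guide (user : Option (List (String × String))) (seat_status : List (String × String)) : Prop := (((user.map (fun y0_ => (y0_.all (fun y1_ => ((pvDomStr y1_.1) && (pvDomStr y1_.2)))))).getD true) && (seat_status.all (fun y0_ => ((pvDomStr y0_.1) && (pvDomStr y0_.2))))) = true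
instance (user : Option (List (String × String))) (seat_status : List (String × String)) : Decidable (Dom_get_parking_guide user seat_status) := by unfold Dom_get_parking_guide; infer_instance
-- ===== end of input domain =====

-- B replaces A's staged first-match filters by priority selection: rank every empty seat
-- by (area-not-in-seat, index), take the minimum, branch on the winner's rank (objective: alternative).

-- ===== PORT A =====
def get_parking_guide (user : Option (List (String × String))) (seat_status : List (String × String)) : String :=
  match user with
  | none => "외부 차량입니다. 경비실로 문의해 주세요."
  | some u =>
    let name := (List.lookup "name" u).getD ""      -- KeyError excluded by Pre_
    let dong := (List.lookup "dong" u).getD ""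
    let my_area := (List.lookup "my_area" u).getD ""
    let all_empty := (seat_status.filter (fun p => p.2 == "Empty")).map Prod.fst
    if all_empty.isEmpty then
      name ++ "님, 현재 전 구역 만차입니다. 우선 입차 후 통로에서 서행하며 빈자리를 기다려 주세요."
    else
      let my_home_empty := all_empty.filter (fun s => PySem.Str.isIn my_area s)
      if my_home_empty.isEmpty = false then
        let best_seat := PySem.List.pyGetD my_home_empty 0 ""
        name ++ "님 환영합니다! 거주하시는 " ++ dong ++ " 근처 [" ++ best_seat ++ "]에 주차하세요."
      else
        let alt_seat := PySem.List.pyGetD all_empty 0 ""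
        name ++ "님, " ++ dong ++ " 근처가 만차입니다. 다른 구역 중 가장 가까운 [" ++ alt_seat ++ "]로 안내할게요."

-- ===== PORT B =====
-- Source B's ranked comprehension: (0/1 priority, enumerate index) for each empty seat
def pvRanked (area : String) (seat_status : List (String × String)) : List (Int × Int) :=
  ((PySem.List.enumerate seat_status 0).filter (fun p => p.2.2 == "Empty")).map
    (fun p => ((if PySem.Str.isIn area p.2.1 then (0 : Int) else 1), p.1))

-- Python's min over the tuple list: running lexicographic minimum, first minimum kept
def pvMinLex (c : Int × Int) (rest : List (Int × Int)) : Int × Int :=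
  rest.foldl (fun m q => if q.1 < m.1 ∨ (q.1 = m.1 ∧ q.2 < m.2) then q else m) c

def get_parking_guide_alt (user : Option (List (String × String))) (seat_status : List (String × String)) : String :=
  match user with
  | none => "외부 차량입니다. 경비실로 문의해 주세요."
  | some u =>
    let name := (List.lookup "name" u).getD ""
    let dong := (List.lookup "dong" u).getD ""
    let my_area := (List.lookup "my_area" u).getD ""
    match pvRanked my_area seat_status with
    | [] =>
      name ++ "님, 현재 전 구역 만차입니다. 우선 입차 후 통로에서 서행하며 빈자리를 기다려 주세요."
    | c :: rest =>
      let m := pvMinLex c rest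
      let best := PySem.List.pyGetD (seat_status.map Prod.fst) m.2 ""
      if m.1 = 0 then
        name ++ "님 환영합니다! 거주하시는 " ++ dong ++ " 근처 [" ++ best ++ "]에 주차하세요."
      else
        name ++ "님, " ++ dong ++ " 근처가 만차입니다. 다른 구역 중 가장 가까운 [" ++ best ++ "]로 안내할게요."

-- ===== PRECONDITION & SPEC =====
-- Pre_ excludes only the inputs where Python A raises KeyError: a non-None user dict
-- missing one of the keys 'name', 'dong', 'my_area'.
def Pre_get_parking_guide (user : Option (List (String × String))) (_seat_status : List (String × String)) : Prop :=
  match user with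
  | none => True
  | some u => "name" ∈ u.map Prod.fst ∧ "dong" ∈ u.map Prod.fst ∧ "my_area" ∈ u.map Prod.fst
instance (user : Option (List (String × String))) (seat_status : List (String × String)) : Decidable (Pre_get_parking_guide user seat_status) := by unfold Pre_get_parking_guide; cases user <;> infer_instance

def pvWitness_get_parking_guide : (Option (List (String × String))) × (List (String × String)) :=
  (some [("name", "Kim"), ("dong", "101"), ("my_area", "A")], [("A-1", "Empty"), ("B-2", "Full")])

def Spec_get_parking_guide (user : Option (List (String × String))) (seat_status : List (String × String)) (out : String) : Prop := out = get_parking_guide_alt user seat_status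
instance (user : Option (List (String × String))) (seat_status : List (String × String)) (out : String) : Decidable (Spec_get_parking_guide user seat_status out) := by unfold Spec_get_parking_guide; infer_instance

-- ===== CLAIM (what is proved, stated in full; the proofs are below) =====
def Claim_equal_get_parking_guide : Prop := ∀ (user : Option (List (String × String))) (seat_status : List (String × String)), Dom_get_parking_guide user seat_status → Pre_get_parking_guide user seat_status → Spec_get_parking_guide user seat_status (get_parking_guide user seat_status)

-- ===== LEMMAS AND PROOFS =====

-- the running lexicographic minimum of a list whose ranks are 0/1 and whose indices
-- strictly increase is the first rank-0 element, else the head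
theorem pvMinLex_spec (rest : List (Int × Int)) (c : Int × Int)
    (h01 : ∀ p ∈ c :: rest, p.1 = 0 ∨ p.1 = 1)
    (hinc : (c :: rest).Pairwise (fun p q : Int × Int => p.2 < q.2)) :
    pvMinLex c rest = ((c :: rest).find? (fun p => p.1 == 0)).getD c := by
  induction rest generalizing c with
  | nil =>
    rcases h01 c (by simp) with h | h <;> simp [pvMinLex, List.find?, h]
  | cons a t ih =>
    have hca : c.2 < a.2 := (List.pairwise_cons.1 hinc).1 a (by simp)
    rcases h01 c (by simp) with hc | hc
    · -- c already rank 0: stays the minimum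
      have step : pvMinLex c (a :: t) = pvMinLex c t := by
        simp only [pvMinLex, List.foldl_cons]
        rcases h01 a (by simp) with ha | ha
        · rw [if_neg]; omega
        · rw [if_neg]; omega
      rw [step, ih c]
      · simp [List.find?, hc]
      · intro p hp; exact h01 p (by rcases List.mem_cons.1 hp with h | h <;> simp [h])
      · have := List.pairwise_cons.1 hinc
        exact List.pairwise_cons.2 ⟨fun p hp => this.1 p (by simp [hp]),
          (List.pairwise_cons.1 this.2).2⟩
    · rcases h01 a (by simp) with ha | ha
      · -- a is rank 0, c rank 1: a wins and then stays
        have step : pvMinLex c (a :: t) = pvMinLex a t := by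
          simp only [pvMinLex, List.foldl_cons]; rw [if_pos]; omega
        rw [step, ih a]
        · simp [List.find?, hc, ha]
        · intro p hp; exact h01 p (by rcases List.mem_cons.1 hp with h | h <;> simp [h])
        · exact (List.pairwise_cons.1 hinc).2
      · -- both rank 1: keep c, skip a in find?
        have step : pvMinLex c (a :: t) = pvMinLex c t := by
          simp only [pvMinLex, List.foldl_cons]; rw [if_neg]; omega
        rw [step, ih c]
        · simp [List.find?, hc, ha]
        · intro p hp; exact h01 p (by rcases List.mem_cons.1 hp with h | h <;> simp [h])
        · have := List.pairwise_cons.1 hinc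
          exact List.pairwise_cons.2 ⟨fun p hp => this.1 p (by simp [hp]),
            (List.pairwise_cons.1 this.2).2⟩

-- projecting the filtered enumeration back to the seats recovers A's filter
theorem pvEnumFilter_map (ss : List (String × String)) (s : Int) :
    ((PySem.List.enumerate ss s).filter (fun p => p.2.2 == "Empty")).map (·.2)
      = ss.filter (fun p => p.2 == "Empty") := by
  induction ss generalizing s with
  | nil => simp [PySem.List.enumerate_nil]
  | cons a t ih =>
    rw [PySem.List.enumerate_cons]
    by_cases h : a.2 == "Empty" <;> simp [h, ih]

-- every entry of the filtered enumeration indexes its own seat in the key list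
theorem pvEnumFilter_index (ss : List (String × String)) (p : Int × (String × String))
    (hp : p ∈ (PySem.List.enumerate ss 0).filter (fun q => q.2.2 == "Empty")) :
    PySem.List.pyGetD (ss.map Prod.fst) p.1 "" = p.2.1 := by
  have hmem : p ∈ PySem.List.enumerate ss 0 := (List.mem_filter.1 hp).1
  rcases (PySem.List.mem_enumerate_iff ss 0 p).1 hmem with ⟨k, hk, rfl⟩
  simp only [zero_add]
  rw [PySem.List.pyGetD_natCast]
  simp [List.getD, hk]

theorem pvEnumFilter_pairwise (ss : List (String × String)) :
    (((PySem.List.enumerate ss 0).filter (fun q => q.2.2 == "Empty")).map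
        (fun p => ((if PySem.Str.isIn a p.2.1 then (0 : Int) else 1), p.1))).Pairwise
      (fun p q : Int × Int => p.2 < q.2) := by
  rw [List.pairwise_map]
  exact (PySem.List.pairwise_lt_enumerate ss 0).filter _

-- head of a filter is find?
theorem pvHead?_filter {α : Type} (p : α → Bool) (l : List α) :
    (l.filter p).head? = l.find? p := by
  induction l with
  | nil => simp
  | cons a t ih => by_cases h : p a <;> simp [List.find?, h, ih]

-- ===== VERDICT (by name: the statement is the Claim_ definition above) =====
theorem get_parking_guide_spec : Claim_equal_get_parking_guide := by
  intro user seat_status _ _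
  unfold Spec_get_parking_guide get_parking_guide get_parking_guide_alt
  cases user with
  | none => rfl
  | some u =>
    simp only
    set area := (List.lookup "my_area" u).getD "" with harea
    set E := (PySem.List.enumerate seat_status 0).filter (fun q => q.2.2 == "Empty") with hE
    have hr : pvRanked area seat_status
        = E.map (fun p => ((if PySem.Str.isIn area p.2.1 then (0 : Int) else 1), p.1)) := rfl
    have hmapE : E.map (fun q => q.2) = seat_status.filter (fun p => p.2 == "Empty") :=
      pvEnumFilter_map seat_status 0
    have hae : (seat_status.filter (fun p => p.2 == "Empty")).map Prod.fst
        = E.map (fun q => q.2.1) := by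
      rw [← hmapE, List.map_map]; rfl
    cases hEeq : E with
    | nil =>
      rw [hr, hEeq]
      simp [hae, hEeq]
    | cons e et =>
      have he_mem : e ∈ E := by rw [hEeq]; simp
      rw [hr, hEeq]
      simp only [List.map_cons]
      -- the selected minimum
      have h01 : ∀ p ∈ (e :: et).map
          (fun p => ((if PySem.Str.isIn area p.2.1 then (0 : Int) else 1), p.1)), p.1 = 0 ∨ p.1 = 1 := by
        intro p hp
        rcases List.mem_map.1 hp with ⟨q, _, rfl⟩
        by_cases h : PySem.Chars.isIn area.toList q.2.1.toList = true <;>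
          simp [PySem.Str.isIn, h]
      have hinc := pvEnumFilter_pairwise (a := area) seat_status
      rw [← hE, hEeq] at hinc
      have hmin := pvMinLex_spec
        ((et).map (fun p => ((if PySem.Str.isIn area p.2.1 then (0 : Int) else 1), p.1)))
        ((if PySem.Str.isIn area e.2.1 then (0 : Int) else 1), e.1)
        (by simpa using h01) (by simpa using hinc)
      have hcons : List.map (fun p : Int × (String × String) =>
          ((if PySem.Str.isIn area p.2.1 then (0 : Int) else 1), p.1)) (e :: et)
          = ((if PySem.Str.isIn area e.2.1 then (0 : Int) else 1), e.1)
            :: List.map (fun p => ((if PySem.Str.isIn area p.2.1 then (0 : Int) else 1), p.1)) et := rfl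
      rw [← hcons, List.find?_map] at hmin
      have hpred : ((fun p : Int × Int => p.1 == 0) ∘
          (fun p : Int × (String × String) => ((if PySem.Str.isIn area p.2.1 then (0 : Int) else 1), p.1)))
          = fun p : Int × (String × String) => PySem.Str.isIn area p.2.1 := by
        funext p; by_cases h : PySem.Chars.isIn area.toList p.2.1.toList = true <;>
          simp [PySem.Str.isIn, h]
      rw [hpred] at hmin
      -- A-side lists
      have haeC : (seat_status.filter (fun p => p.2 == "Empty")).map Prod.fst
          = e.2.1 :: et.map (fun q => q.2.1) := by rw [hae, hEeq]; simp
      have hmh : (((seat_status.filter (fun p => p.2 == "Empty")).map Prod.fst).filter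
            (fun s => PySem.Str.isIn area s)).head?
          = ((e :: et).find? (fun p => PySem.Str.isIn area p.2.1)).map (fun q => q.2.1) := by
        rw [haeC, pvHead?_filter]
        have hconsS : (e.2.1 :: List.map (fun q : Int × (String × String) => q.2.1) et)
            = List.map (fun q : Int × (String × String) => q.2.1) (e :: et) := rfl
        rw [hconsS, List.find?_map]; rfl
      cases hfind : (e :: et).find? (fun p => PySem.Str.isIn area p.2.1) with
      | some p =>
        have hpE : p ∈ E := by rw [hEeq]; exact List.mem_of_find?_eq_some hfind
        have hpIn : PySem.Str.isIn area p.2.1 = true := by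
          simpa using List.find?_some hfind
        have hbest : PySem.List.pyGetD (seat_status.map Prod.fst) p.1 "" = p.2.1 :=
          pvEnumFilter_index seat_status p (by rw [hE] at hpE; exact hpE)
        rw [hfind] at hmin
        simp only [Option.map_some, Option.getD_some] at hmin
        rw [hmin]
        simp only [hpIn, if_true]
        rw [hfind] at hmh
        simp only [Option.map_some] at hmh
        have hmhne : (((seat_status.filter (fun p => p.2 == "Empty")).map Prod.fst).filter
            (fun s => PySem.Str.isIn area s)) = p.2.1 :: (((seat_status.filter (fun p => p.2 == "Empty")).map Prod.fst).filter
            (fun s => PySem.Str.isIn area s)).tail := by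
          cases hm : (((seat_status.filter (fun p => p.2 == "Empty")).map Prod.fst).filter
            (fun s => PySem.Str.isIn area s)) with
          | nil => rw [hm] at hmh; simp at hmh
          | cons x xs => rw [hm] at hmh; simp at hmh; simp [hmh]
        rw [haeC] at hmhne ⊢
        rw [hmhne]
        simp [hbest, PySem.List.pyGetD_zero_cons]
      | none =>
        have heNotIn : PySem.Str.isIn area e.2.1 = false := by
          have := List.find?_eq_none.1 hfind e (by simp)
          simpa using this
        rw [hfind] at hmin
        simp only [Option.map_none, Option.getD_none] at hmin
        rw [hmin]
        simp only [heNotIn, Bool.false_eq_true, if_false]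
        rw [hfind] at hmh
        simp only [Option.map_none] at hmh
        have hmhnil : (((seat_status.filter (fun p => p.2 == "Empty")).map Prod.fst).filter
            (fun s => PySem.Str.isIn area s)) = [] := List.head?_eq_none_iff.1 hmh
        have hbest : PySem.List.pyGetD (seat_status.map Prod.fst) e.1 "" = e.2.1 :=
          pvEnumFilter_index seat_status e (by rw [hE] at he_mem; exact he_mem)
        rw [haeC] at hmhnil ⊢
        rw [hmhnil]
        simp [hbest, PySem.List.pyGetD_zero_cons]
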